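-- pv_equiv track=rewrite | github.com/ValentinBilot/Jazz_generator_ML_ATIAM | Distance/DISTANCE.py | add_notes
-- ===== SOURCE A (Python) =====
-- def add_notes(chord1,chord2):     #utile si les deux accords n'ont pas le même nb de notes
--
--     result = [chord1]
--
--     for k in range (len(chord2)-len(chord1)):
--         temp=[]
--
--         for l in result :
--
--             for note in chord1 :
--                 temp.append(l+[note])
--
--         result = temp
--
--     return result
-- ===== SOURCE B (Python) =====
-- def add_notes(chord1, chord2):
--     d = len(chord2) - len(chord1)
--     if d <= 0:
--         return [chord1]
--
--     def tups(n):
--         if n == 0: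
--             return [[]]
--         return [[x] + t for x in chord1 for t in tups(n - 1)]
--
--     return [chord1 + t for t in tups(d)]
-- ===== Notes on version B (the rewrite author's own statement) =====
-- stated objective: alternative
-- what changed: Replaces A's iterated rebuild-of-the-whole-result loop (each pass extends every partial list at the back by one note) with a direct recursive cons-form enumeration of all length-d note tuples followed by a single map prepending chord1, plus an early return [chord1] when d <= 0.
import Mathlib
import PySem

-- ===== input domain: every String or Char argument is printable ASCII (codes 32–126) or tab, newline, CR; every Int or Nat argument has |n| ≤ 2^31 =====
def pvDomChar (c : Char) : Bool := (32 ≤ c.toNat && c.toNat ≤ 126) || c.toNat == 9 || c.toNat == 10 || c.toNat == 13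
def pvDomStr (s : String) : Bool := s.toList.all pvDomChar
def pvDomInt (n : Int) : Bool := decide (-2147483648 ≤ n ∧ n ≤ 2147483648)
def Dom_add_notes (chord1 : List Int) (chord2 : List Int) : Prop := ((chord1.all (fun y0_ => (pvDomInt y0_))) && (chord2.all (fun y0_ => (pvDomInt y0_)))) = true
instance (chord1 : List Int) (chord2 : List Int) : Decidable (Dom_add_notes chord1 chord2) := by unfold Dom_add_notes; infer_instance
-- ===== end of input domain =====

-- B replaces A's iterated rebuild loop with a recursive cons-form tuple enumeration and one final map (alternative decomposition; return value only).


-- ===== PORT A =====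
-- literal transliteration: result = [chord1]; for k in range(len(chord2)-len(chord1)):
--   temp = []; for l in result: for note in chord1: temp.append(l+[note]); result = temp
def add_notes (chord1 : List Int) (chord2 : List Int) : List (List Int) :=
  (PySem.List.pyRange 0 ((chord2.length : Int) - (chord1.length : Int)) 1).foldl
    (fun result _k =>
      result.foldl (fun temp l =>
        chord1.foldl (fun temp note => temp ++ [l ++ [note]]) temp) ([] : List (List Int)))
    [chord1]

-- ===== PORT B =====
-- tups n = all length-n tuples of notes from chord1, first position varying slowest (cons form)
def pvTups (chord1 : List Int) : Nat → List (List Int)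
  | 0 => [[]]
  | n + 1 => chord1.flatMap (fun x => (pvTups chord1 n).map (fun t => x :: t))

def add_notes_alt (chord1 : List Int) (chord2 : List Int) : List (List Int) :=
  let d : Int := (chord2.length : Int) - (chord1.length : Int)
  if d ≤ 0 then [chord1]
  else (pvTups chord1 d.toNat).map (fun t => chord1 ++ t)

-- ===== PRECONDITION & SPEC =====
def Spec_add_notes (chord1 : List Int) (chord2 : List Int) (out : List (List Int)) : Prop := out = add_notes_alt chord1 chord2
instance (chord1 : List Int) (chord2 : List Int) (out : List (List Int)) : Decidable (Spec_add_notes chord1 chord2 out) := by unfold Spec_add_notes; infer_instance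

-- ===== CLAIM (what is proved, stated in full; the proofs are below) =====
def Claim_equal_add_notes : Prop := ∀ (chord1 : List Int) (chord2 : List Int), Dom_add_notes chord1 chord2 → Spec_add_notes chord1 chord2 (add_notes chord1 chord2)

-- ===== LEMMAS AND PROOFS =====

-- A's one pass over `result`, written as flatMap
def pvStep (c : List Int) (r : List (List Int)) : List (List Int) :=
  r.flatMap (fun l => c.map (fun n => l ++ [n]))

theorem pvInner_eq (c : List Int) (l : List Int) (acc : List (List Int)) :
    c.foldl (fun temp note => temp ++ [l ++ [note]]) acc = acc ++ c.map (fun n => l ++ [n]) := by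
  induction c generalizing acc with
  | nil => simp [List.foldl]
  | cons x xs ih => simp [List.foldl, ih]

theorem pvBody_eq (c : List Int) (r acc : List (List Int)) :
    r.foldl (fun temp l => c.foldl (fun temp note => temp ++ [l ++ [note]]) temp) acc
      = acc ++ pvStep c r := by
  induction r generalizing acc with
  | nil => simp [List.foldl, pvStep]
  | cons l ls ih =>
      rw [List.foldl_cons, pvInner_eq, ih]
      simp only [pvStep, List.flatMap_cons, List.append_assoc]

-- extending every tuple at the back commutes with mapping any append-compatible prefix function
theorem pvStep_map_comm (c : List Int) (f : List Int → List Int)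
    (hf : ∀ l n, f l ++ [n] = f (l ++ [n])) (r : List (List Int)) :
    pvStep c (r.map f) = (pvStep c r).map f := by
  induction r with
  | nil => rfl
  | cons t ts ih =>
      simp only [List.map_cons, pvStep, List.flatMap_cons, List.map_append, List.map_map] at *
      rw [ih]
      congr 1
      exact List.map_congr_left (fun n _ => hf t n)

theorem pvStep_append (c : List Int) (r s : List (List Int)) :
    pvStep c (r ++ s) = pvStep c r ++ pvStep c s := by
  simp [pvStep]

theorem pvStep_flatMap (c : List Int) (l : List Int) (g : Int → List (List Int)) :
    pvStep c (l.flatMap g) = l.flatMap (fun x => pvStep c (g x)) := by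
  induction l with
  | nil => rfl
  | cons x xs ih => rw [List.flatMap_cons, List.flatMap_cons, pvStep_append, ih]

theorem pvSingles (c : List Int) :
    c.flatMap (fun x => [[x]]) = c.map (fun n => ([n] : List Int)) := by
  induction c with
  | nil => rfl
  | cons x xs ih => rw [List.flatMap_cons, List.map_cons, ih]; rfl

-- snoc-extension of the cons-form tuple list equals the cons-form list one longer
theorem pvTups_succ (c : List Int) (m : Nat) :
    pvTups c (m + 1) = c.flatMap (fun x => (pvTups c m).map (fun t => x :: t)) := rfl

theorem pvStep_tups (c : List Int) (k : Nat) :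
    pvStep c (pvTups c k) = pvTups c (k + 1) := by
  induction k with
  | zero =>
      rw [pvTups_succ]
      simp only [pvTups, pvStep, List.flatMap_cons, List.flatMap_nil, List.append_nil, pvSingles,
        List.map_cons, List.map_nil]
      exact (List.map_congr_left (fun n _ => by simp)).symm
  | succ n ih =>
      rw [pvTups_succ c (n + 1)]
      conv_lhs => rw [pvTups_succ c n]
      rw [pvStep_flatMap]
      have hx : (fun x => pvStep c ((pvTups c n).map (fun t => x :: t)))
          = (fun x => (pvTups c (n + 1)).map (fun t => x :: t)) := by
        funext x
        rw [pvStep_map_comm c (fun t => x :: t) (fun _ _ => rfl), ih]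
      rw [hx]

theorem pvIter (c : List Int) (k : Nat) (L : List Int) (hL : L.length = k) :
    L.foldl (fun result _ =>
        result.foldl (fun temp l =>
          c.foldl (fun temp note => temp ++ [l ++ [note]]) temp) ([] : List (List Int)))
      [c] = (pvTups c k).map (fun t => c ++ t) := by
  induction k generalizing L with
  | zero =>
      have : L = [] := List.length_eq_zero_iff.mp hL
      subst this; simp [pvTups]
  | succ n ih =>
      rcases L.eq_nil_or_concat with rfl | ⟨M, a, rfl⟩
      · simp at hL
      · have hM : M.length = n := by simpa using hL
        rw [List.concat_eq_append, List.foldl_append, ih M hM]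
        simp only [List.foldl_cons, List.foldl_nil]
        rw [pvBody_eq]
        simp only [List.nil_append]
        rw [pvStep_map_comm c (fun t => c ++ t) (fun l n => by simp),
            pvStep_tups]

-- ===== VERDICT (by name: the statement is the Claim_ definition above) =====
theorem add_notes_spec : Claim_equal_add_notes := by
  intro c1 c2 _
  unfold Spec_add_notes add_notes add_notes_alt
  set d : Int := (c2.length : Int) - (c1.length : Int) with hd
  by_cases h : d ≤ 0
  · have : PySem.List.pyRange 0 d 1 = [] := by
      have := PySem.List.length_pyRange_one 0 d
      simp only [Int.sub_zero] at this
      have hz : (d - 0).toNat = 0 := by omega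
      apply List.eq_nil_of_length_eq_zero
      omega
    simp [this, h]
  · have hlen : (PySem.List.pyRange 0 d 1).length = d.toNat := by
      have := PySem.List.length_pyRange_one 0 d
      omega
    rw [pvIter c1 d.toNat _ hlen]
    simp [h]
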